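-- pv_equiv track=rewrite | github.com/sieukim/algorithm-programmers | level1/ex11.py | solution
-- ===== SOURCE A (Python) =====
-- def solution(array, commands):
--     numbers = []
--
--     for command in commands:
--         [i, j, k] = command
--         # ith ~ jth slice
--         sliced = array[i - 1 : j]
--         # sort and find kth
--         number = sorted(sliced)[k - 1]
--         # add to numbers
--         numbers.append(number)
--
--     return numbers
-- ===== SOURCE B (Python) =====
-- def quickselect(s, r):
--     p = s[0]
--     less = [x for x in s if x < p]
--     if r < len(less):
--         return quickselect(less, r)
--     equal = sum(1 for x in s if x == p)
--     if r < len(less) + equal: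
--         return p
--     return quickselect([x for x in s if x > p], r - len(less) - equal)
--
--
-- def solution(array, commands):
--     numbers = []
--     for i, j, k in commands:
--         sliced = array[i - 1:j]
--         r = k - 1
--         if r < 0:
--             r += len(sliced)
--         numbers.append(quickselect(sliced, r))
--     return numbers
-- ===== Notes on version B (the rewrite author's own statement) =====
-- stated objective: alternative
-- what changed: Replaces sorting each slice with an explicit three-way-partition quickselect that recurses only into the partition containing the requested rank (after normalising a negative Python index).
import Mathlib
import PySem

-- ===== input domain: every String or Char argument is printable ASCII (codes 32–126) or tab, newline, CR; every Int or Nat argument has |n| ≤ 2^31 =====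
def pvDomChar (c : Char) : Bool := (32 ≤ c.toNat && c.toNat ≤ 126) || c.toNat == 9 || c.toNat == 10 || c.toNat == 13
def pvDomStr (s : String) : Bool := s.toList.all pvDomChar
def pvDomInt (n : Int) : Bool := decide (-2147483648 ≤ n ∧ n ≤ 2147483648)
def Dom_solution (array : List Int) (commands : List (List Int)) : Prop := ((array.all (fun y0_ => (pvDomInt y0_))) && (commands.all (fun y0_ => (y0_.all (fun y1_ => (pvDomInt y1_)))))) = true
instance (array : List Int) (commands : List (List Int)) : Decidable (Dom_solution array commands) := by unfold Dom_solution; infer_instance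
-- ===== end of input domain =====

-- B answers each command by a three-way-partition quickselect on the slice instead of sorting it (alternative algorithm, same results).

-- ===== PORT A =====
-- per command: [i, j, k] = command; sliced = array[i-1:j]; number = sorted(sliced)[k-1]
-- (the getD defaults are only reached outside Pre_, where the Python raises)
def solution (array : List Int) (commands : List (List Int)) : List Int :=
  commands.foldl (fun numbers command =>
    let i := command.getD 0 0
    let j := command.getD 1 0
    let k := command.getD 2 0
    let sliced := PySem.List.slice array (some (i - 1)) (some j)
    let number := (PySem.List.pyGet? (PySem.List.sorted sliced (fun x => x) false) (k - 1)).getD 0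
    numbers ++ [number]) []

-- ===== PORT B =====
-- quickselect(s, r): pivot = s[0]; recurse only into the partition holding rank r
-- (s = [] is Python's IndexError on s[0], only reached outside Pre_)
def quickselectB (s : List Int) (r : Int) : Int :=
  match s with
  | [] => 0
  | p :: t =>
    let less := (p :: t).filter (fun x => decide (x < p))
    if r < (less.length : Int) then quickselectB less r
    else
      let equal := ((p :: t).filter (fun x => decide (x = p))).length
      if r < (less.length : Int) + equal then p
      else quickselectB ((p :: t).filter (fun x => decide (p < x))) (r - (less.length : Int) - (equal : Int))
termination_by s.length
decreasing_by
  · exact List.length_filter_lt_length_iff_exists.mpr ⟨p, List.mem_cons_self, by simp⟩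
  · exact List.length_filter_lt_length_iff_exists.mpr ⟨p, List.mem_cons_self, by simp⟩

def solution_alt (array : List Int) (commands : List (List Int)) : List Int :=
  commands.foldl (fun numbers command =>
    let i := command.getD 0 0
    let j := command.getD 1 0
    let k := command.getD 2 0
    let sliced := PySem.List.slice array (some (i - 1)) (some j)
    let r0 := k - 1
    let r := if r0 < 0 then r0 + (sliced.length : Int) else r0
    numbers ++ [quickselectB sliced r]) []

-- ===== PRECONDITION & SPEC =====
-- Pre_ excludes exactly the inputs where A raises: a command that is not a triple (ValueError on
-- unpacking) or whose index k-1 is out of range of the sorted slice (IndexError).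
def Pre_solution (array : List Int) (commands : List (List Int)) : Prop :=
  ∀ c ∈ commands, c.length = 3 ∧
    PySem.Raise.InRange (PySem.List.slice array (some (c.getD 0 0 - 1)) (some (c.getD 1 0))).length (c.getD 2 0 - 1)
instance (array : List Int) (commands : List (List Int)) : Decidable (Pre_solution array commands) := by unfold Pre_solution; infer_instance

def pvWitness_solution : List Int × List (List Int) := ([3, 1, 2, 2, 5], [[1, 5, 3], [2, 4, 1], [3, 5, -1]])

def Spec_solution (array : List Int) (commands : List (List Int)) (out : List Int) : Prop := out = solution_alt array commands
instance (array : List Int) (commands : List (List Int)) (out : List Int) : Decidable (Spec_solution array commands out) := by unfold Spec_solution; infer_instance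

-- ===== CLAIM (what is proved, stated in full; the proofs are below) =====
def Claim_equal_solution : Prop := ∀ (array : List Int) (commands : List (List Int)), Dom_solution array commands → Pre_solution array commands → Spec_solution array commands (solution array commands)

-- ===== LEMMAS AND PROOFS =====

-- sorted s splits at the head pivot into sorted-less ++ equal ++ sorted-greater
lemma sorted_partition (p : Int) (t : List Int) :
    PySem.List.sorted (p :: t) (fun x => x) false =
      PySem.List.sorted ((p :: t).filter (fun x => decide (x < p))) (fun x => x) false
      ++ (p :: t).filter (fun x => decide (x = p))
      ++ PySem.List.sorted ((p :: t).filter (fun x => decide (p < x))) (fun x => x) false := by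
  set s := p :: t with hs
  set L := s.filter (fun x => decide (x < p)) with hL
  set E := s.filter (fun x => decide (x = p)) with hE
  set G := s.filter (fun x => decide (p < x)) with hG
  have hmemL : ∀ x ∈ PySem.List.sorted L (fun x => x) false, x < p := by
    intro x hx
    have := (PySem.List.mem_sorted L (fun x => x) false x).mp hx
    simpa using (List.mem_filter.mp this).2
  have hmemE : ∀ x ∈ E, x = p := by
    intro x hx; simpa using (List.mem_filter.mp hx).2
  have hmemG : ∀ x ∈ PySem.List.sorted G (fun x => x) false, p < x := by
    intro x hx
    have := (PySem.List.mem_sorted G (fun x => x) false x).mp hx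
    simpa using (List.mem_filter.mp this).2
  apply PySem.List.eq_of_perm_of_pairwise_le_of_injective (fun x => x) (fun a b h => h)
  · have hM : (E ++ G).Perm (s.filter (fun x => !decide (x < p))) := by
      have h2 := List.filter_append_perm (fun x => decide (x = p)) (s.filter (fun x => !decide (x < p)))
      rw [List.filter_filter, List.filter_filter] at h2
      refine List.Perm.trans ?_ h2
      apply List.Perm.append
      · rw [hE, List.filter_congr]; intro x _; by_cases hx : x = p <;> simp [hx] <;> try omega
      · rw [hG, List.filter_congr]; intro x _; by_cases hx : p < x <;> simp [hx] <;> omega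
    have hA : (PySem.List.sorted L (fun x => x) false ++ E ++ PySem.List.sorted G (fun x => x) false).Perm
        (L ++ (E ++ G)) := by
      rw [List.append_assoc]
      exact (PySem.List.sorted_perm L _ _).append ((List.Perm.refl E).append (PySem.List.sorted_perm G _ _))
    refine (PySem.List.sorted_perm s _ _).trans ?_
    refine List.Perm.trans ?_ (hA.trans ((List.Perm.refl L).append hM)).symm
    exact (List.filter_append_perm _ s).symm
  · exact PySem.List.sorted_pairwise s _
  · rw [List.append_assoc]
    rw [List.pairwise_append]
    refine ⟨PySem.List.sorted_pairwise L _, ?_, ?_⟩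
    · rw [List.pairwise_append]
      refine ⟨List.pairwise_of_forall_mem_list (fun a ha b hb => ?_), PySem.List.sorted_pairwise G _, ?_⟩
      · rw [hmemE a ha, hmemE b hb]
      · intro a ha b hb
        have := hmemE a ha; have := hmemG b hb; omega
    · intro a ha b hb
      have h1 := hmemL a ha
      rcases List.mem_append.mp hb with hb | hb
      · have := hmemE b hb; omega
      · have := hmemG b hb; omega

-- quickselect at an in-bounds rank is the sorted slice at that rank
lemma qs_sorted (s : List Int) (r : Int) (h0 : 0 ≤ r) (h1 : r < (s.length : Int)) :
    quickselectB s r = (PySem.List.sorted s (fun x => x) false).getD r.toNat 0 := by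
  induction s, r using quickselectB.induct with
  | case1 r => simp at h1; omega
  | case2 r p t less hlt ih =>
    simp only [less] at hlt
    rw [quickselectB, if_pos hlt, ih h0 hlt, sorted_partition, List.append_assoc,
        List.getD_append _ _ _ _ (by rw [PySem.List.length_sorted]; omega)]
  | case3 r p t less hge equal hlt =>
    simp only [less, equal] at hge hlt
    rw [quickselectB, if_neg hge, if_pos hlt, sorted_partition, List.append_assoc,
        List.getD_append_right _ _ _ _ (by rw [PySem.List.length_sorted]; omega)]
    rw [PySem.List.length_sorted]
    have hm : r.toNat - ((p :: t).filter (fun x => decide (x < p))).length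
        < ((p :: t).filter (fun x => decide (x = p))).length := by omega
    rw [List.getD_append _ _ _ _ hm, List.getD_eq_getElem _ _ hm]
    exact ((by simpa using (List.mem_filter.mp (List.getElem_mem hm)).2 : _ = p)).symm
  | case4 r p t less hge1 equal hge2 ih =>
    simp only [less, equal] at hge1 hge2 ih
    have hlen := congrArg List.length (sorted_partition p t)
    simp only [List.length_append, PySem.List.length_sorted] at hlen
    have hb0 : 0 ≤ r - (((p :: t).filter (fun x => decide (x < p))).length : Int)
        - (((p :: t).filter (fun x => decide (x = p))).length : Int) := by omega
    have hb1 : r - (((p :: t).filter (fun x => decide (x < p))).length : Int)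
        - (((p :: t).filter (fun x => decide (x = p))).length : Int)
        < (((p :: t).filter (fun x => decide (p < x))).length : Int) := by omega
    rw [quickselectB, if_neg hge1, if_neg hge2, ih hb0 hb1, sorted_partition, List.append_assoc,
        List.getD_append_right _ _ _ _ (by rw [PySem.List.length_sorted]; omega),
        List.getD_append_right _ _ _ _ (by rw [PySem.List.length_sorted]; omega)]
    rw [PySem.List.length_sorted]
    congr 1
    omega

-- an in-range Python index reads as getElem? at the index B normalises to
lemma pyGet?_inrange {α : Type} (xs : List α) (i : Int) (h : PySem.Raise.InRange xs.length i) :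
    PySem.List.pyGet? xs i = xs[(if i < 0 then i + xs.length else i).toNat]? := by
  obtain ⟨h1, h2⟩ := h
  simp only [PySem.List.pyGet?, PySem.List.pyIdx?]
  split_ifs with h3 h4 h5 <;> simp_all <;> try omega
  · congr 1; omega

-- ===== VERDICT (by name: the statement is the Claim_ definition above) =====
theorem solution_spec : Claim_equal_solution := by
  intro array commands _ hpre
  unfold Spec_solution
  simp only [solution, solution_alt,
    PySem.List.foldl_append_singleton_eq_map, List.nil_append]
  apply List.map_congr_left
  intro c hc
  obtain ⟨-, hin⟩ := hpre c hc
  set sliced := PySem.List.slice array (some (c.getD 0 0 - 1)) (some (c.getD 1 0)) with hsl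
  set k := c.getD 2 0 with hk
  have hin' : PySem.Raise.InRange (PySem.List.sorted sliced (fun x => x) false).length (k - 1) := by
    rw [PySem.List.length_sorted]; exact hin
  rw [pyGet?_inrange _ _ hin', ← List.getD_eq_getElem?_getD, PySem.List.length_sorted]
  obtain ⟨hin1, hin2⟩ := hin
  rw [qs_sorted sliced _ (by split_ifs <;> omega) (by split_ifs <;> omega)]
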